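-- pv_equiv track=rewrite | github.com/elenaslavutina/Lesson3 | task3.py | sum_two_max
-- ===== SOURCE A (Python) =====
-- def sum_two_max(stroka):
--     s = stroka.split()
--     minimum = int(s[0])
--     summ = int(s[0])
--     for i in range(1,len(s)):
--         if int(s[i])<minimum:
--             minimum = int(s[i])
--         summ = summ + int(s[i])
--     summ = summ - minimum
--
--     return summ
-- ===== SOURCE B (Python) =====
-- def sum_two_max(stroka):
--     nums = sorted(int(x) for x in stroka.split())
--     return sum(nums[1:])
-- ===== Notes on version B (the rewrite author's own statement) =====
-- stated objective: alternative
-- what changed: Replaces A's single fused loop that maintains running min and sum accumulators with a sort-based algorithm: sort the parsed numbers and sum everything after the smallest element (sum(sorted(nums)[1:]) = sum - min).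
import Mathlib
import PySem

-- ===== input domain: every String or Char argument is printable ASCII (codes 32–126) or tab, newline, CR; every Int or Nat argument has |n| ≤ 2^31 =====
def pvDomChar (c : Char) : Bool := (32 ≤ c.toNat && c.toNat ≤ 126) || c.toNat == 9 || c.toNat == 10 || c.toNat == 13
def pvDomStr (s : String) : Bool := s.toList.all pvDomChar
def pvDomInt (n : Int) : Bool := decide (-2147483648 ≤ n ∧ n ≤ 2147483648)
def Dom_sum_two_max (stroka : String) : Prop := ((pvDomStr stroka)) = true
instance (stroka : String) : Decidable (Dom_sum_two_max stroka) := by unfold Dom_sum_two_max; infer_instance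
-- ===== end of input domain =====

-- B sorts the parsed numbers and sums everything after the smallest (a sort-based alternative
-- to A's fused min/sum accumulator loop); same return value on Pre_, no speed claim.

-- ===== PORT A =====
def sum_two_max (stroka : String) : Int :=
  let s := PySem.Str.split₀ stroka
  let minimum := (PySem.Int.ofStr? (PySem.List.pyGetD s 0 "")).getD 0
  let summ := minimum
  let res := (PySem.List.pyRange 1 (s.length : Int) 1).foldl
    (fun (st : Int × Int) i =>
      let v := (PySem.Int.ofStr? (PySem.List.pyGetD s i "")).getD 0
      ((if v < st.1 then v else st.1), st.2 + v)) (minimum, summ)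
  res.2 - res.1

-- ===== PORT B =====
def sum_two_max_alt (stroka : String) : Int :=
  let nums := PySem.List.sorted ((PySem.Str.split₀ stroka).map (fun x => (PySem.Int.ofStr? x).getD 0)) (fun v => v) false
  (PySem.List.slice nums (some 1) none).sum

-- ===== PRECONDITION & SPEC =====
-- Pre_ excludes exactly the inputs where Python A raises: the empty token list (IndexError)
-- and non-integer tokens (ValueError); B also raises ValueError on bad tokens.
def Pre_sum_two_max (stroka : String) : Prop :=
  PySem.Str.split₀ stroka ≠ [] ∧ ∀ t ∈ PySem.Str.split₀ stroka, PySem.Int.ofStr? t ≠ none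
instance (stroka : String) : Decidable (Pre_sum_two_max stroka) := by unfold Pre_sum_two_max; infer_instance
def pvWitness_sum_two_max : String := "3 1 2"

def Spec_sum_two_max (stroka : String) (out : Int) : Prop := out = sum_two_max_alt stroka
instance (stroka : String) (out : Int) : Decidable (Spec_sum_two_max stroka out) := by unfold Spec_sum_two_max; infer_instance

-- ===== CLAIM (what is proved, stated in full; the proofs are below) =====
def Claim_equal_sum_two_max : Prop := ∀ (stroka : String), Dom_sum_two_max stroka → Pre_sum_two_max stroka → Spec_sum_two_max stroka (sum_two_max stroka)

-- ===== LEMMAS AND PROOFS =====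

-- A's loop over the tail, as a list fold: min component is the running min, sum component accumulates.
theorem pv_fold_char (l : List String) (m su : Int) :
    l.foldl (fun (st : Int × Int) t =>
        let v := (PySem.Int.ofStr? t).getD 0
        ((if v < st.1 then v else st.1), st.2 + v)) (m, su)
      = ((l.map (fun t => (PySem.Int.ofStr? t).getD 0)).foldl min m,
         su + (l.map (fun t => (PySem.Int.ofStr? t).getD 0)).sum) := by
  induction l generalizing m su with
  | nil => simp
  | cons h t ih =>
    simp only [List.foldl_cons, List.map_cons, List.sum_cons, ih]
    rw [Prod.mk.injEq]
    refine ⟨?_, by ring⟩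
    congr 1
    simp only [min_def]
    split_ifs <;> omega

-- The head of sorted(v :: vs) is A's running minimum, and the whole sum splits off that head.
theorem pv_sorted_tail_sum (v : Int) (vs : List Int) :
    (PySem.List.slice (PySem.List.sorted (v :: vs) (fun x => x) false) (some 1) none).sum
      = (v + vs.sum) - vs.foldl min v := by
  rw [PySem.List.slice_from_one]
  have hne : PySem.List.sorted (v :: vs) (fun x => x) false ≠ [] := by
    simp [PySem.List.sorted_eq_nil_iff]
  cases hs : PySem.List.sorted (v :: vs) (fun x => x) false with
  | nil => exact absurd hs hne
  | cons h t =>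
    have hperm : (h :: t).Perm (v :: vs) := hs ▸ PySem.List.sorted_perm (v :: vs) (fun x => x) false
    have hsum : (h :: t).sum = (v :: vs).sum := hperm.sum_eq
    -- h is the minimum of v :: vs, i.e. equals vs.foldl min v
    have hmin? : PySem.List.min? (v :: vs) (fun y => y) = some (vs.foldl min v) :=
      PySem.List.min?_id_cons v vs
    have hm_mem : vs.foldl min v ∈ (v :: vs) := PySem.List.min?_mem hmin?
    have hm_isMin : ∀ y ∈ (v :: vs), vs.foldl min v ≤ y := PySem.List.min?_isMin hmin?
    have hh_mem : h ∈ (v :: vs) := hperm.mem_iff.mp (List.mem_cons_self)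
    have hh_le : ∀ y ∈ (v :: vs), h ≤ y := PySem.List.key_head_sorted_le (v :: vs) (fun x => x) hs
    have hhm : h = vs.foldl min v :=
      le_antisymm (hh_le _ hm_mem) (hm_isMin _ hh_mem)
    have := hsum
    simp only [List.sum_cons] at this
    simp only [List.tail_cons]
    omega

-- ===== VERDICT (by name: the statement is the Claim_ definition above) =====
theorem sum_two_max_spec : Claim_equal_sum_two_max := by
  intro stroka _ hpre
  unfold Spec_sum_two_max sum_two_max sum_two_max_alt
  obtain ⟨hne, -⟩ := hpre
  cases hs : PySem.Str.split₀ stroka with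
  | nil => exact absurd hs hne
  | cons h t =>
    dsimp only
    rw [PySem.List.foldl_pyRange_pyGetD' (h :: t) ""
          (fun (st : Int × Int) tok =>
            ((if (PySem.Int.ofStr? tok).getD 0 < st.1 then (PySem.Int.ofStr? tok).getD 0 else st.1),
             st.2 + (PySem.Int.ofStr? tok).getD 0)) _ (by norm_num)]
    simp only [PySem.List.pyGetD, PySem.List.pyGet?]
    rw [pv_fold_char]
    simp only [List.map_cons, pv_sorted_tail_sum]
    simp [PySem.List.pyIdx?]
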